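-- pv_equiv track=rewrite | github.com/lee-JunR/Algorithm_BAEKJOON | 백준/Gold/2493. 탑/탑.py | find_receiver_tower
-- ===== SOURCE A (Python) =====
-- def find_receiver_tower(heights):
--     stack = []
--     receivers = [0] * len(heights)
--
--     for i in range(len(heights) - 1, -1, -1):
--         # 스택이 비어있지 않고, 스택의 탑이 현재 탑보다 높을 때
--         while stack and heights[stack[-1]] < heights[i]:
--             receiver = stack.pop()
--             receivers[receiver] = i + 1  # 수신하는 탑의 번호 기록
--
--         stack.append(i)  # 현재 탑을 스택에 추가
--
--     return receivers
-- ===== SOURCE B (Python) =====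
-- def find_receiver_tower(heights):
--     out = []
--     for j in range(len(heights)):
--         r = 0
--         for i in range(j - 1, -1, -1):
--             if heights[i] > heights[j]:
--                 r = i + 1
--                 break
--         out.append(r)
--     return out
-- ===== Notes on version B (the rewrite author's own statement) =====
-- stated objective: simpler
-- what changed: Replaced the reversed monotonic-stack sweep (assigning receivers to popped indices while scanning right-to-left) with a direct per-tower backward scan that finds the nearest strictly taller tower to the left, no stack or mutable array at all.
import Mathlib
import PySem

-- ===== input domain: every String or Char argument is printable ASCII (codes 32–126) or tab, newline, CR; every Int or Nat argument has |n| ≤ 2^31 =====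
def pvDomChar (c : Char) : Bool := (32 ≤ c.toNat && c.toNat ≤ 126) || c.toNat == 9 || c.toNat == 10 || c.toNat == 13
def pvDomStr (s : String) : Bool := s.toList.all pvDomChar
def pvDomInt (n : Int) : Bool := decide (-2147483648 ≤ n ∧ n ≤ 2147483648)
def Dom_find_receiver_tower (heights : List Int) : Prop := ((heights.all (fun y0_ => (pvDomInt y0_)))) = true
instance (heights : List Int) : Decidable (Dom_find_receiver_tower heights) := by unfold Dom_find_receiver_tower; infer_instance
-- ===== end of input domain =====

-- B replaces A's right-to-left monotonic-stack sweep by a plain per-tower backward scan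
-- for the nearest strictly taller tower to the left (objective: simpler; not faster).

-- ===== PORT A =====
-- A's inner while loop; the Lean list head is Python's stack[-1] (top).
-- All stack entries and i are valid indices of heights, so `getD _ 0` is exact here.
def aWhile (h : List Int) (i : Nat) : List Nat → List Int → List Nat × List Int
  | [], recv => ([], recv)
  | top :: rest, recv =>
    if h.getD top 0 < h.getD i 0 then
      aWhile h i rest (recv.set top ((i : Int) + 1))
    else (top :: rest, recv)

-- A's outer for loop over i = len-1, …, 0 (counter k means current i = k-1 … 0 remain).
def aLoop (h : List Int) : Nat → List Nat → List Int → List Nat × List Int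
  | 0, stack, recv => (stack, recv)
  | k+1, stack, recv =>
    let p := aWhile h k stack recv
    aLoop h k (k :: p.1) p.2

def find_receiver_tower (heights : List Int) : List Int :=
  (aLoop heights heights.length [] (List.replicate heights.length 0)).2

-- ===== PORT B =====
-- B's inner loop: i = j-1, …, 0, break at the first heights[i] > heights[j].
def bScan (h : List Int) (hj : Int) : Nat → Int
  | 0 => 0
  | i+1 => if hj < h.getD i 0 then (i : Int) + 1 else bScan h hj i

def find_receiver_tower_alt (heights : List Int) : List Int :=
  (List.range heights.length).map (fun j => bScan heights (heights.getD j 0) j)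

-- ===== PRECONDITION & SPEC =====
def Spec_find_receiver_tower (heights : List Int) (out : List Int) : Prop := out = find_receiver_tower_alt heights
instance (heights : List Int) (out : List Int) : Decidable (Spec_find_receiver_tower heights out) := by unfold Spec_find_receiver_tower; infer_instance

-- ===== CLAIM (what is proved, stated in full; the proofs are below) =====
def Claim_equal_find_receiver_tower : Prop := ∀ (heights : List Int), Dom_find_receiver_tower heights → Spec_find_receiver_tower heights (find_receiver_tower heights)

-- ===== LEMMAS AND PROOFS =====

-- scanF h hj k j: B's backward scan from j-1, but stopping (returning 0) below floor k.
def scanF (h : List Int) (hj : Int) (k : Nat) : Nat → Int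
  | 0 => 0
  | i+1 => if i < k then 0 else if hj < h.getD i 0 then (i : Int) + 1 else scanF h hj k i

-- j is "visible" from position k: no tower in [k, j) is strictly taller than tower j.
def vis (h : List Int) (k j : Nat) : Bool :=
  (List.range' k (j - k)).all (fun i => decide (h.getD i 0 ≤ h.getD j 0))

-- A's stack after having processed indices ≥ k (top = head = smallest index).
def stackSpec (h : List Int) (k : Nat) : List Nat :=
  (List.range' k (h.length - k)).filter (fun j => vis h k j)

lemma bScan_eq_scanF (h : List Int) (hj : Int) : ∀ j, bScan h hj j = scanF h hj 0 j := by
  intro j; induction j with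
  | zero => rfl
  | succ i ih => simp [bScan, scanF, ih]

lemma scanF_le (h : List Int) (hj : Int) : ∀ {j k : Nat}, j ≤ k → scanF h hj k j = 0 := by
  intro j; induction j with
  | zero => intro k _; rfl
  | succ i ih => intro k hk; simp [scanF, Nat.lt_of_succ_le hk]

lemma aWhile_eq (h : List Int) (i : Nat) : ∀ (stack : List Nat) (recv : List Int),
    aWhile h i stack recv =
      (stack.dropWhile (fun t => decide (h.getD t 0 < h.getD i 0)),
       (stack.takeWhile (fun t => decide (h.getD t 0 < h.getD i 0))).foldl
         (fun r t => r.set t ((i : Int) + 1)) recv) := by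
  intro stack; induction stack with
  | nil => intro recv; rfl
  | cons top rest ih =>
    intro recv
    by_cases hlt : h.getD top 0 < h.getD i 0
    · simp only [aWhile, List.dropWhile, List.takeWhile, if_pos hlt, decide_eq_true hlt, ih,
        List.foldl_cons]
    · simp only [aWhile, List.dropWhile, List.takeWhile, if_neg hlt, decide_eq_false hlt,
        List.foldl_nil]

-- On a list where the Bool predicate is downward closed (f later → f earlier),
-- dropWhile/takeWhile coincide with filter.
lemma dtw {α : Type} (f : α → Bool) : ∀ l : List α,
    l.Pairwise (fun a b => f b = true → f a = true) →
    l.dropWhile f = l.filter (fun x => !f x) ∧ l.takeWhile f = l.filter f := by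
  intro l; induction l with
  | nil => intro _; exact ⟨rfl, rfl⟩
  | cons a tl ih =>
    intro hp
    rcases List.pairwise_cons.mp hp with ⟨ha, htl⟩
    rcases ih htl with ⟨hd, ht⟩
    by_cases hfa : f a = true
    · constructor
      · simp [List.dropWhile, List.filter, hfa, hd]
      · simp [List.takeWhile, List.filter, hfa, ht]
    · constructor
      · simp only [List.dropWhile, List.filter, hfa]
        simp only [Bool.not_false] at *
        rw [List.filter_eq_self.mpr]
        intro b hb
        simp only [Bool.not_eq_true']
        by_contra hc
        exact hfa (ha b hb (by simpa using hc))
      · simp only [List.takeWhile, List.filter, hfa]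
        rw [Eq.comm, List.filter_eq_nil_iff]
        intro b hb hfb
        exact hfa (ha b hb hfb)

lemma pairwise_stackSpec (h : List Int) (k : Nat) :
    (stackSpec h k).Pairwise (fun a b => h.getD a 0 ≤ h.getD b 0) := by
  unfold stackSpec
  rw [List.pairwise_filter]
  rw [List.pairwise_iff_getElem]
  intro i j hi hj hij _ hvb
  simp only [List.getElem_range'] at *
  unfold vis at hvb
  rw [List.all_eq_true] at hvb
  have hmem : k + 1 * i ∈ List.range' k (k + 1 * j - k) := by
    rw [List.mem_range']
    exact ⟨i, by omega, rfl⟩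
  simpa using hvb _ hmem

lemma foldl_set_length (v : Int) : ∀ (l : List Nat) (recv : List Int),
    (l.foldl (fun r t => r.set t v) recv).length = recv.length := by
  intro l; induction l with
  | nil => intro recv; rfl
  | cons t tl ih => intro recv; simp [List.foldl, ih]

lemma getD_set_eq (recv : List Int) (t j : Nat) (v : Int) :
    (recv.set t v).getD j 0 = if t = j ∧ j < recv.length then v else recv.getD j 0 := by
  by_cases h1 : t = j
  · subst h1
    by_cases h2 : t < recv.length
    · simp [List.getD_eq_getElem?_getD, h2]
    · rw [List.getD_eq_getElem?_getD, List.getD_eq_getElem?_getD, List.getElem?_set]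
      simp only [h2, and_false, if_false, if_true]
      rw [List.getElem?_eq_none (by omega)]
  · simp [List.getD_eq_getElem?_getD, h1]

lemma foldl_set_getD (v : Int) : ∀ (l : List Nat) (recv : List Int) (j : Nat),
    (l.foldl (fun r t => r.set t v) recv).getD j 0 =
      if j ∈ l ∧ j < recv.length then v else recv.getD j 0 := by
  intro l; induction l with
  | nil => intro recv j; simp
  | cons t tl ih =>
    intro recv j
    simp only [List.foldl_cons, ih, List.length_set, List.mem_cons, getD_set_eq]
    by_cases h3 : t = j
    · subst h3
      by_cases h1 : t ∈ tl <;> by_cases h2 : t < recv.length <;> simp [h1, h2]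
    · have h3' : j ≠ t := fun hh => h3 hh.symm
      by_cases h1 : j ∈ tl <;> by_cases h2 : j < recv.length <;> simp [h1, h2, h3, h3']

lemma scanF_split (h : List Int) (hj : Int) (k : Nat) : ∀ d,
    scanF h hj k (k+1+d) =
      if (List.range' (k+1) d).all (fun i => decide (h.getD i 0 ≤ hj)) then
        (if hj < h.getD k 0 then (k : Int) + 1 else 0)
      else scanF h hj (k+1) (k+1+d) := by
  intro d; induction d with
  | zero =>
    simp only [Nat.add_zero, List.range'_zero, List.all_nil, if_true]
    simp [scanF, scanF_le h hj (Nat.le_refl k)]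
  | succ d ih =>
    have e1 : k+1+(d+1) = (k+1+d)+1 := by omega
    rw [e1]
    show (if k+1+d < k then (0:Int) else if hj < h.getD (k+1+d) 0 then ((k+1+d : Nat) : Int) + 1
          else scanF h hj k (k+1+d)) = _
    have hg : ¬ (k+1+d < k) := by omega
    rw [if_neg hg]
    have hrc : List.range' (k+1) (d+1) = List.range' (k+1) d ++ [k+1+d] := by
      rw [List.range'_concat]; norm_num
    by_cases hc : hj < h.getD (k+1+d) 0
    · have hall : (List.range' (k+1) (d+1)).all (fun i => decide (h.getD i 0 ≤ hj)) = false := by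
        rw [hrc]
        simp only [List.all_append, List.all_cons, List.all_nil, Bool.and_eq_false_iff]
        right
        simp only [decide_eq_false_iff_not, not_le]
        exact Or.inl hc
      rw [if_pos hc, hall, if_neg (by simp)]
      show _ = (if k+1+d < k+1 then (0:Int) else if hj < h.getD (k+1+d) 0 then ((k+1+d : Nat) : Int) + 1
          else scanF h hj (k+1) (k+1+d))
      rw [if_neg (by omega), if_pos hc]
    · rw [if_neg hc, ih]
      have hall : (List.range' (k+1) (d+1)).all (fun i => decide (h.getD i 0 ≤ hj)) =
          (List.range' (k+1) d).all (fun i => decide (h.getD i 0 ≤ hj)) := by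
        rw [hrc]
        simp only [List.all_append, List.all_cons, List.all_nil, Bool.and_true]
        rw [decide_eq_true (not_lt.mp hc), Bool.and_true]
      rw [hall]
      by_cases hv : (List.range' (k+1) d).all (fun i => decide (h.getD i 0 ≤ hj)) = true
      · rw [if_pos hv, if_pos hv]
      · rw [if_neg hv, if_neg hv]
        show _ = (if k+1+d < k+1 then (0:Int) else if hj < h.getD (k+1+d) 0 then ((k+1+d : Nat) : Int) + 1
            else scanF h hj (k+1) (k+1+d))
        rw [if_neg (by omega), if_neg hc]

lemma scanF_all_le (h : List Int) (hj : Int) : ∀ (j k : Nat),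
    (List.range' k (j - k)).all (fun i => decide (h.getD i 0 ≤ hj)) = true →
    scanF h hj k j = 0 := by
  intro j; induction j with
  | zero => intro k _; rfl
  | succ j ih =>
    intro k hall
    by_cases hjk : j < k
    · simp [scanF, hjk]
    · have hk : k ≤ j := by omega
      have hrc : List.range' k (j + 1 - k) = List.range' k (j - k) ++ [k + 1 * (j - k)] := by
        have : j + 1 - k = (j - k) + 1 := by omega
        rw [this, List.range'_concat]
      rw [hrc] at hall
      simp only [List.all_append, List.all_cons, List.all_nil, Bool.and_eq_true] at hall
      have hkj : k + 1 * (j - k) = j := by omega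
      rw [hkj] at hall
      have hle : h.getD j 0 ≤ hj := by simpa using hall.2.1
      simp only [scanF, hjk, if_false]
      rw [if_neg (by omega), ih k hall.1]

lemma aLoop_inv (h : List Int) : ∀ k, k ≤ h.length → ∀ recv : List Int,
    recv.length = h.length →
    (∀ j, j < h.length → recv.getD j 0 = scanF h (h.getD j 0) k j) →
    (aLoop h k (stackSpec h k) recv).2.length = h.length ∧
    ∀ j, j < h.length → (aLoop h k (stackSpec h k) recv).2.getD j 0 = scanF h (h.getD j 0) 0 j := by
  intro k; induction k with
  | zero =>
    intro _ recv hlen hinv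
    exact ⟨hlen, hinv⟩
  | succ k ih =>
    intro hk recv hlen hinv
    set n := h.length with hn
    have hkn : k < n := by omega
    set f : Nat → Bool := fun t => decide (h.getD t 0 < h.getD k 0) with hf
    have hpw : (stackSpec h (k+1)).Pairwise (fun a b => f b = true → f a = true) := by
      apply (pairwise_stackSpec h (k+1)).imp
      intro a b hab hfb
      simp only [hf, decide_eq_true_eq] at *
      omega
    rcases dtw f _ hpw with ⟨hdrop, htake⟩
    -- the stack after the pops, with k pushed, is stackSpec h k
    have hsplitvis : ∀ j ∈ List.range' (k+1) (n-(k+1)),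
        vis h k j = (decide (h.getD k 0 ≤ h.getD j 0) && vis h (k+1) j) := by
      intro j hj
      rw [List.mem_range'] at hj
      obtain ⟨i, hi, rfl⟩ := hj
      show vis h k (k+1+1*i) = _
      unfold vis
      have e : (k+1+1*i) - k = ((k+1+1*i) - (k+1)) + 1 := by omega
      rw [e, List.range'_succ, List.all_cons]
    have hstack : k :: (stackSpec h (k+1)).dropWhile f = stackSpec h k := by
      rw [hdrop]
      unfold stackSpec
      rw [List.filter_filter]
      have hrk : List.range' k (n - k) = k :: List.range' (k+1) (n-(k+1)) := by
        have : n - k = (n - (k+1)) + 1 := by omega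
        rw [this, List.range'_succ]
      rw [hrk]
      have hvk : vis h k k = true := by unfold vis; simp
      simp only [List.filter_cons, hvk, if_true]
      congr 1
      apply List.filter_congr
      intro j hj
      rw [hsplitvis j hj, hf]
      congr 1
      show (!decide (h.getD j 0 < h.getD k 0)) = decide (h.getD k 0 ≤ h.getD j 0)
      by_cases hlt : h.getD j 0 < h.getD k 0
      · rw [decide_eq_true hlt, decide_eq_false (show ¬ h.getD k 0 ≤ h.getD j 0 by omega)]
        rfl
      · rw [decide_eq_false hlt, decide_eq_true (show h.getD k 0 ≤ h.getD j 0 by omega)]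
        rfl
    -- membership in the popped prefix
    have hmemtake : ∀ j, j ∈ (stackSpec h (k+1)).takeWhile f ↔
        (j ∈ List.range' (k+1) (n-(k+1)) ∧ vis h (k+1) j = true ∧ h.getD j 0 < h.getD k 0) := by
      intro j
      rw [htake]
      unfold stackSpec
      rw [List.filter_filter, List.mem_filter]
      simp only [hf, Bool.and_eq_true, decide_eq_true_eq]
      tauto
    -- the new receivers list satisfies the invariant at k
    have step : aLoop h (k+1) (stackSpec h (k+1)) recv =
        aLoop h k (k :: (aWhile h k (stackSpec h (k+1)) recv).1) (aWhile h k (stackSpec h (k+1)) recv).2 := rfl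
    set recv' := (aWhile h k (stackSpec h (k+1)) recv).2 with hrecv'
    have hrw := aWhile_eq h k (stackSpec h (k+1)) recv
    have hstack' : k :: (aWhile h k (stackSpec h (k+1)) recv).1 = stackSpec h k := by
      rw [hrw]; exact hstack
    have hlen' : recv'.length = n := by
      rw [hrecv', hrw]; simpa [foldl_set_length] using hlen
    have hinv' : ∀ j, j < n → recv'.getD j 0 = scanF h (h.getD j 0) k j := by
      intro j hjn
      rw [hrecv', hrw]
      simp only
      rw [foldl_set_getD]
      by_cases hjk : j ≤ k
      · have hnm : ¬ (j ∈ (stackSpec h (k+1)).takeWhile f) := by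
          rw [hmemtake]
          rintro ⟨hm, -, -⟩
          rw [List.mem_range'] at hm
          omega
        rw [if_neg (by tauto)]
        rw [hinv j hjn, scanF_le h _ (by omega), scanF_le h _ (by omega)]
      · have hjk' : k < j := by omega
        have hmr : j ∈ List.range' (k+1) (n-(k+1)) := by
          rw [List.mem_range']
          exact ⟨j - (k+1), by omega, by omega⟩
        have hd : j = k + 1 + (j - (k+1)) := by omega
        have hsplit := scanF_split h (h.getD j 0) k (j - (k+1))
        rw [← hd] at hsplit
        have hviseq : vis h (k+1) j =
            (List.range' (k+1) (j-(k+1))).all (fun i => decide (h.getD i 0 ≤ h.getD j 0)) := rfl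
        by_cases hv : vis h (k+1) j = true
        · by_cases hlt : h.getD j 0 < h.getD k 0
          · rw [if_pos ⟨(hmemtake j).mpr ⟨hmr, hv, hlt⟩, by omega⟩]
            rw [hsplit, if_pos (by rw [← hviseq]; exact hv), if_pos hlt]
          · have hnm : ¬ (j ∈ (stackSpec h (k+1)).takeWhile f) := by
              rw [hmemtake]; rintro ⟨-, -, hc⟩; exact hlt hc
            rw [if_neg (by tauto)]
            rw [hinv j hjn, hsplit, if_pos (by rw [← hviseq]; exact hv), if_neg hlt]
            exact scanF_all_le h _ j (k+1) (by rw [← hviseq]; exact hv)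
        · have hnm : ¬ (j ∈ (stackSpec h (k+1)).takeWhile f) := by
            rw [hmemtake]; rintro ⟨-, hc, -⟩; exact hv hc
          rw [if_neg (by tauto)]
          rw [hinv j hjn, hsplit, if_neg (by rw [← hviseq]; exact hv)]
    rw [step, hstack']
    exact ih (by omega) recv' hlen' hinv'

-- ===== VERDICT (by name: the statement is the Claim_ definition above) =====
theorem find_receiver_tower_spec : Claim_equal_find_receiver_tower := by
  intro heights _
  unfold Spec_find_receiver_tower
  have hstack0 : stackSpec heights heights.length = [] := by
    simp [stackSpec]
  have hinv0 : ∀ j, j < heights.length →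
      (List.replicate heights.length (0:Int)).getD j 0 =
        scanF heights (heights.getD j 0) heights.length j := by
    intro j hj
    rw [scanF_le heights _ (by omega)]
    simp [List.getD_eq_getElem?_getD, hj]
  have hmain := aLoop_inv heights heights.length (le_refl _)
    (List.replicate heights.length 0) (by simp) hinv0
  rw [hstack0] at hmain
  rcases hmain with ⟨hlen, hptw⟩
  unfold find_receiver_tower find_receiver_tower_alt
  apply List.ext_getElem
  · simp [hlen]
  · intro j hj hj2
    have hjn : j < heights.length := by simpa [hlen] using hj
    have hx := hptw j hjn
    rw [List.getD_eq_getElem?_getD, List.getElem?_eq_getElem (by omega)] at hx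
    simp only [Option.getD_some] at hx
    rw [List.getElem_map, List.getElem_range, bScan_eq_scanF]
    exact hx
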